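-- pv_equiv track=rewrite | github.com/HellOwhatAs/seg520 | uw_dataset.py | replace_glob_stars
-- ===== SOURCE A (Python) =====
-- def replace_glob_stars(pattern: str, replacements: list[str]) -> str:
--     parts = pattern.split("*")
--     assert len(replacements) == len(parts) - 1
--     result = []
--     for part, rep in zip(parts, replacements):
--         result.append(part)
--         result.append(rep)
--     result.append(parts[-1])
--     return "".join(result)
-- ===== SOURCE B (Python) =====
-- def replace_glob_stars(pattern: str, replacements: list[str]) -> str:
--     assert pattern.count("*") == len(replacements)
--     it = iter(replacements)
--     out = []
--     for ch in pattern: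
--         out.append(next(it) if ch == "*" else ch)
--     return "".join(out)
-- ===== Notes on version B (the rewrite author's own statement) =====
-- stated objective: idiomatic
-- what changed: B replaces split-on-'*' plus zip/interleave/join with a single forward character scan that emits each char and draws the next replacement from an iterator at every '*'.
import Mathlib
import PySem

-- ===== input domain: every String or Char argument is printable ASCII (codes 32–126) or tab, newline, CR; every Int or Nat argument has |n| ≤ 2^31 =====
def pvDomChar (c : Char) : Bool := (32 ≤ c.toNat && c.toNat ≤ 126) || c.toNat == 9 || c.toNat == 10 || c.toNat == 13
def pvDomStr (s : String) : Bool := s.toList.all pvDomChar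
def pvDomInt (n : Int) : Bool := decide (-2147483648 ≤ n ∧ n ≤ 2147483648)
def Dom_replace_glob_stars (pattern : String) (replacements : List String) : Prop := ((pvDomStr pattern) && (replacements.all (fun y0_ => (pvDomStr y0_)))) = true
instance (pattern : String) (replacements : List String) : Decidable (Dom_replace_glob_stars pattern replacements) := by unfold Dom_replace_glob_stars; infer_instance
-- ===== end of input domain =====

-- B replaces split-on-'*' + zip/interleave/join with a single forward character scan (idiomatic; same cost).


-- ===== PORT A =====
-- parts = pattern.split("*"); the assert becomes the guard (its failure is excluded by Pre_, so the
-- "" else-branch is never the claimed value); parts is always nonempty, so the .getD defaults of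
-- split?/pyGet? are never taken.
def replace_glob_stars (pattern : String) (replacements : List String) : String :=
  let parts := (PySem.Str.split? pattern "*").getD []
  if replacements.length = parts.length - 1 then
    let result := (parts.zip replacements).foldl (fun acc pr => acc ++ [pr.1, pr.2]) []
    let result := result ++ [(PySem.List.pyGet? parts (-1)).getD ""]
    PySem.Str.join "" result
  else ""

-- ===== PORT B =====
-- the per-char scan of Source B; the [] branch of next(it) is unreachable under the assert (the guard)
def pvScan (reps : List String) (cs : List Char) : List String :=
  match cs with
  | [] => []
  | c :: rest =>
    if c = '*' then
      match reps with
      | r :: rs => r :: pvScan rs rest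
      | [] => pvScan [] rest
    else String.ofList [c] :: pvScan reps rest

def replace_glob_stars_alt (pattern : String) (replacements : List String) : String :=
  if PySem.Str.count pattern "*" = replacements.length then
    PySem.Str.join "" (pvScan replacements pattern.toList)
  else ""

-- ===== PRECONDITION & SPEC =====
-- Pre_ excludes exactly the inputs where A's assert fails (AssertionError): the number of
-- replacements must equal the number of '*' in the pattern.
def Pre_replace_glob_stars (pattern : String) (replacements : List String) : Prop :=
  replacements.length = PySem.Str.count pattern "*"
instance (pattern : String) (replacements : List String) : Decidable (Pre_replace_glob_stars pattern replacements) := by unfold Pre_replace_glob_stars; infer_instance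

def pvWitness_replace_glob_stars : String × List String := ("a*b*c", ["X", "YY"])

def Spec_replace_glob_stars (pattern : String) (replacements : List String) (out : String) : Prop := out = replace_glob_stars_alt pattern replacements
instance (pattern : String) (replacements : List String) (out : String) : Decidable (Spec_replace_glob_stars pattern replacements out) := by unfold Spec_replace_glob_stars; infer_instance

-- ===== CLAIM (what is proved, stated in full; the proofs are below) =====
def Claim_equal_replace_glob_stars : Prop := ∀ (pattern : String) (replacements : List String), Dom_replace_glob_stars pattern replacements → Pre_replace_glob_stars pattern replacements → Spec_replace_glob_stars pattern replacements (replace_glob_stars pattern replacements)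

-- ===== LEMMAS AND PROOFS =====

-- structural characterisation of PySem.Chars.splitOn with a one-char separator
def mySplit (c0 : Char) (pre : List Char) : List Char → List (List Char)
  | [] => [pre]
  | c :: cs => if c = c0 then pre :: mySplit c0 [] cs else mySplit c0 (pre ++ [c]) cs

theorem splitOn_go_eq (c0 : Char) :
    ∀ (fuel : Nat) (l cur : List Char) (acc : List (List Char)), l.length < fuel →
      PySem.Chars.splitOn.go [c0] fuel l cur acc = acc.reverse ++ mySplit c0 cur.reverse l := by
  intro fuel
  induction fuel with
  | zero => intro l cur acc h; omega
  | succ n ih =>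
    intro l cur acc h
    cases l with
    | nil => simp [PySem.Chars.splitOn.go, mySplit]
    | cons c rest =>
      by_cases hc : c = c0
      · subst hc
        have hpre : ([c] : List Char).isPrefixOf (c :: rest) = true := by
          simp [List.isPrefixOf]
        rw [show PySem.Chars.splitOn.go [c] (n + 1) (c :: rest) cur acc =
            PySem.Chars.splitOn.go [c] n rest [] (cur.reverse :: acc) by
          simp [PySem.Chars.splitOn.go, hpre]]
        rw [ih rest [] (cur.reverse :: acc) (by simpa using Nat.lt_of_succ_lt_succ h)]
        simp [mySplit]
      · have hpre : ([c0] : List Char).isPrefixOf (c :: rest) = false := by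
          simp [List.isPrefixOf]
          exact fun hh => (hc hh.symm).elim
        rw [show PySem.Chars.splitOn.go [c0] (n + 1) (c :: rest) cur acc =
            PySem.Chars.splitOn.go [c0] n rest (c :: cur) acc by
          simp [PySem.Chars.splitOn.go, hpre]]
        rw [ih rest (c :: cur) acc (by simpa using Nat.lt_of_succ_lt_succ h)]
        simp [mySplit, hc]

theorem splitOn_eq (c0 : Char) (s : List Char) :
    PySem.Chars.splitOn s [c0] = mySplit c0 [] s := by
  unfold PySem.Chars.splitOn
  rw [splitOn_go_eq c0 (s.length + 1) s [] [] (by omega)]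
  simp

theorem count_go_eq (c0 : Char) :
    ∀ (fuel : Nat) (l : List Char) (acc : Nat), l.length ≤ fuel →
      PySem.Chars.count.go [c0] fuel l acc = acc + l.count c0 := by
  intro fuel
  induction fuel with
  | zero =>
    intro l acc h
    match l, h with
    | [], _ => simp [PySem.Chars.count.go]
  | succ n ih =>
    intro l acc h
    cases l with
    | nil => simp [PySem.Chars.count.go]
    | cons c rest =>
      by_cases hc : c = c0
      · subst hc
        have hpre : ([c] : List Char).isPrefixOf (c :: rest) = true := by
          simp [List.isPrefixOf]
        rw [show PySem.Chars.count.go [c] (n + 1) (c :: rest) acc =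
            PySem.Chars.count.go [c] n rest (acc + 1) by
          simp [PySem.Chars.count.go, hpre]]
        rw [ih rest (acc + 1) (by simpa using Nat.le_of_succ_le_succ h)]
        simp
        omega
      · have hpre : ([c0] : List Char).isPrefixOf (c :: rest) = false := by
          simp [List.isPrefixOf]
          exact fun hh => (hc hh.symm).elim
        rw [show PySem.Chars.count.go [c0] (n + 1) (c :: rest) acc =
            PySem.Chars.count.go [c0] n rest acc by
          simp [PySem.Chars.count.go, hpre]]
        rw [ih rest acc (by simpa using Nat.le_of_succ_le_succ h)]
        simp [hc]

theorem chars_count_eq (c0 : Char) (s : List Char) :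
    PySem.Chars.count s [c0] = s.count c0 := by
  unfold PySem.Chars.count
  rw [if_neg (by simp), count_go_eq c0 s.length s 0 (by omega)]
  omega

theorem mySplit_length (c0 : Char) :
    ∀ (cs pre : List Char), (mySplit c0 pre cs).length = cs.count c0 + 1 := by
  intro cs
  induction cs with
  | nil => intro pre; simp [mySplit]
  | cons c rest ih =>
    intro pre
    by_cases hc : c = c0
    · simp [mySplit, hc, ih]
    · simp [mySplit, hc, ih]

-- the interleaved list A builds, as a structural recursion (String level)
def ivS : List String → List String → List String
  | [p], [] => [p]
  | p :: ps, r :: rs => p :: r :: ivS ps rs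
  | _, _ => []

theorem ivS_cons (p r : String) (ps rs : List String) :
    ivS (p :: ps) (r :: rs) = p :: r :: ivS ps rs := by cases ps <;> rfl

theorem foldA_eq_ivS :
    ∀ (reps parts : List String), parts.length = reps.length + 1 →
      (parts.zip reps).flatMap (fun pr => [pr.1, pr.2]) ++
        [(PySem.List.pyGet? parts (-1)).getD ""] = ivS parts reps := by
  intro reps
  induction reps with
  | nil =>
    intro parts h
    match parts, h with
    | [p], _ => simp [ivS, PySem.List.pyGet?, PySem.List.pyIdx?]
  | cons r rs ih =>
    intro parts h
    match parts, h with
    | p :: q :: ps, h =>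
      have hlen : (q :: ps).length = rs.length + 1 := by simpa using h
      have hget : PySem.List.pyGet? (p :: q :: ps) (-1) = PySem.List.pyGet? (q :: ps) (-1) := by
        simp only [PySem.List.pyGet?, PySem.List.pyIdx?]
        norm_num
        rfl
      rw [ivS_cons, ← ih (q :: ps) hlen, hget]
      simp

-- the characters of A's interleaving
def ivC : List String → List String → List Char
  | [p], [] => p.toList
  | p :: ps, r :: rs => p.toList ++ r.toList ++ ivC ps rs
  | _, _ => []

theorem ivC_cons (p r : String) (ps rs : List String) :
    ivC (p :: ps) (r :: rs) = p.toList ++ r.toList ++ ivC ps rs := by cases ps <;> rfl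

theorem ivS_chars :
    ∀ (reps parts : List String),
      ((ivS parts reps).map String.toList).flatten = ivC parts reps := by
  intro reps
  induction reps with
  | nil =>
    intro parts
    match parts with
    | [] => rfl
    | [p] => simp [ivS, ivC]
    | p :: q :: ps => rfl
  | cons r rs ih =>
    intro parts
    match parts with
    | [] => rfl
    | p :: ps =>
      rw [ivS_cons, ivC_cons]
      simp [ih ps]

-- main lemma: the interleaving of the split parts equals the forward scan
theorem main_scan :
    ∀ (cs : List Char) (reps : List String) (pre : List Char),
      reps.length = cs.count '*' →
      ivC ((mySplit '*' pre cs).map String.ofList) reps =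
        pre ++ ((pvScan reps cs).map String.toList).flatten := by
  intro cs
  induction cs with
  | nil =>
    intro reps pre h
    match reps, h with
    | [], _ => simp [mySplit, ivC, pvScan]
  | cons c rest ih =>
    intro reps pre h
    by_cases hc : c = '*'
    · subst hc
      have h' : reps.length = rest.count '*' + 1 := by simpa [List.count_cons] using h
      match reps, h' with
      | r :: rs, h' =>
        rw [show mySplit '*' pre ('*' :: rest) = pre :: mySplit '*' [] rest by simp [mySplit]]
        rw [show pvScan (r :: rs) ('*' :: rest) = r :: pvScan rs rest by simp [pvScan]]
        rw [List.map_cons, ivC_cons]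
        rw [ih rs [] (Nat.succ_injective (by simpa using h'))]
        simp
    · rw [show mySplit '*' pre (c :: rest) = mySplit '*' (pre ++ [c]) rest by simp [mySplit, hc]]
      rw [show pvScan reps (c :: rest) = String.ofList [c] :: pvScan reps rest by simp [pvScan, hc]]
      rw [ih reps (pre ++ [c]) (by simpa [List.count_cons, hc] using h)]
      simp

theorem intercalate_nil_chars :
    ∀ (l : List (List Char)), List.intercalate ([] : List Char) l = l.flatten := by
  intro l
  induction l with
  | nil => rfl
  | cons x xs ih =>
    cases xs with
    | nil => simp [List.intercalate]
    | cons y ys =>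
      rw [show List.intercalate ([] : List Char) (x :: y :: ys) =
          x ++ List.intercalate [] (y :: ys) by
        simp [List.intercalate, List.intersperse]]
      simp [ih]

theorem join_empty (l : List String) :
    PySem.Str.join "" l = String.ofList ((l.map String.toList).flatten) := by
  simp [PySem.Str.join, PySem.Chars.join, intercalate_nil_chars]

-- ===== VERDICT (by name: the statement is the Claim_ definition above) =====
theorem replace_glob_stars_spec : Claim_equal_replace_glob_stars := by
  intro pattern replacements _ hpre
  unfold Spec_replace_glob_stars
  unfold Pre_replace_glob_stars at hpre
  rw [PySem.Str.count_eq, show ("*" : String).toList = ['*'] from rfl, chars_count_eq] at hpre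
  unfold replace_glob_stars replace_glob_stars_alt
  have hsplit : PySem.Str.split? pattern "*" =
      some ((mySplit '*' [] pattern.toList).map String.ofList) := by
    have := PySem.Str.split?_map pattern "*"
    rw [show ("*" : String).toList = ['*'] from rfl] at this
    rw [PySem.Chars.split?] at this
    rw [if_neg (by simp), splitOn_eq] at this
    cases hs : PySem.Str.split? pattern "*" with
    | none => rw [hs] at this; simp at this
    | some xs =>
      rw [hs] at this
      simp only [Option.map_some, Option.some.injEq] at this
      have hx : xs = (mySplit '*' [] pattern.toList).map String.ofList := by
        simpa [Function.comp_def] using congrArg (List.map String.ofList) this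
      rw [hx]
  rw [hsplit]
  simp only [Option.getD_some]
  set parts := (mySplit '*' [] pattern.toList).map String.ofList with hparts
  have hlen : parts.length = pattern.toList.count '*' + 1 := by
    rw [hparts, List.length_map, mySplit_length]
  rw [PySem.Str.count_eq, show ("*" : String).toList = ['*'] from rfl, chars_count_eq]
  rw [if_pos (by omega), if_pos hpre.symm]
  rw [PySem.List.foldl_append_eq_flatMap]
  rw [List.nil_append]
  rw [foldA_eq_ivS replacements parts (by omega)]
  rw [join_empty, join_empty, ivS_chars, hparts, main_scan _ _ _ hpre]
  simp
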